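-- pv_equiv track=rewrite | github.com/salvac12/alter5-bi | scripts/detect_ghost_companies.py | is_subdomain
-- ===== SOURCE A (Python) =====
-- COMPOUND_TLDS = {
--     ".co.uk", ".co.jp", ".co.kr", ".co.nz", ".co.za", ".co.in",
--     ".com.es", ".com.br", ".com.mx", ".com.ar", ".com.co", ".com.au",
--     ".com.tr", ".com.cn", ".com.sg", ".com.hk",
--     ".org.uk", ".org.es",
--     ".net.au", ".net.br",
--     ".ac.uk", ".gov.uk",
-- }
--
-- def is_subdomain(domain: str) -> bool:
--     """Detect if domain is a subdomain (3+ parts, excluding compound TLDs)."""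
--     domain_lower = domain.lower()
--     # Quitar compound TLDs antes de contar
--     for tld in COMPOUND_TLDS:
--         if domain_lower.endswith(tld):
--             base = domain_lower[: -len(tld)]
--             return "." in base
--     parts = domain_lower.split(".")
--     return len(parts) >= 3
-- ===== SOURCE B (Python) =====
-- COMPOUND_TLDS = {
--     ".co.uk", ".co.jp", ".co.kr", ".co.nz", ".co.za", ".co.in",
--     ".com.es", ".com.br", ".com.mx", ".com.ar", ".com.co", ".com.au",
--     ".com.tr", ".com.cn", ".com.sg", ".com.hk",
--     ".org.uk", ".org.es",
--     ".net.au", ".net.br",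
--     ".ac.uk", ".gov.uk",
-- }
--
-- def is_subdomain(domain: str) -> bool:
--     """Detect if domain is a subdomain (3+ parts, excluding compound TLDs)."""
--     parts = domain.lower().split(".")
--     if len(parts) >= 2 and "." + parts[-2] + "." + parts[-1] in COMPOUND_TLDS:
--         return len(parts) >= 4
--     return len(parts) >= 3
-- ===== Notes on version B (the rewrite author's own statement) =====
-- stated objective: simpler
-- what changed: B drops A's loop that tests endswith against all 22 compound TLDs: it splits the lowercased domain on dots once, reconstructs the candidate compound-TLD key from the last two parts, does a single membership test, and answers by counting parts (>=4 under a compound TLD, else >=3).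
import Mathlib
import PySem

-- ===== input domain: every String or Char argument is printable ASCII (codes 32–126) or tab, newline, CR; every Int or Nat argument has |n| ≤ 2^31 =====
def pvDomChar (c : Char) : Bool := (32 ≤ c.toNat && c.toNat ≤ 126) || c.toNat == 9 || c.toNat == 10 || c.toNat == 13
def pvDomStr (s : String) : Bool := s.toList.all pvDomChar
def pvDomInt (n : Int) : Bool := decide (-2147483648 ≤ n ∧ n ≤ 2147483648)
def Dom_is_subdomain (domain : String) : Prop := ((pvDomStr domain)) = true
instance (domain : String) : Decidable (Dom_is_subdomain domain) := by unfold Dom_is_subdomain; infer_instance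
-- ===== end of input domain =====

-- B replaces A's scan over all 22 compound TLDs (endswith each) by one computed-key membership
-- test on the last two dot-separated labels plus part counting; objective: simpler.

-- ===== PORT A =====
-- the module constant COMPOUND_TLDS (a Python set of string literals, kept in literal order;
-- at most one TLD can match a given string, so the set's iteration order cannot affect A's result)
def pvTLDS : List (List Char) :=
  [".co.uk".toList, ".co.jp".toList, ".co.kr".toList, ".co.nz".toList, ".co.za".toList, ".co.in".toList,
   ".com.es".toList, ".com.br".toList, ".com.mx".toList, ".com.ar".toList, ".com.co".toList, ".com.au".toList,
   ".com.tr".toList, ".com.cn".toList, ".com.sg".toList, ".com.hk".toList,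
   ".org.uk".toList, ".org.es".toList,
   ".net.au".toList, ".net.br".toList,
   ".ac.uk".toList, ".gov.uk".toList]

-- A's loop: 'for tld in COMPOUND_TLDS: if domain_lower.endswith(tld): return "." in domain_lower[:-len(tld)]'
def pvLoopA (dl : List Char) : List (List Char) → Option Bool
  | [] => none
  | tld :: rest =>
    if PySem.Chars.endswith dl tld then
      some (PySem.Chars.isIn ['.'] (PySem.Chars.slice dl none (some (-(PySem.List.len tld)))))
    else pvLoopA dl rest

def is_subdomain (domain : String) : Bool :=
  let dl := PySem.Chars.lower domain.toList
  match pvLoopA dl pvTLDS with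
  | some r => r
  | none => decide (3 ≤ PySem.List.len (PySem.Chars.splitOn dl ['.']))

-- ===== PORT B =====
def is_subdomain_alt (domain : String) : Bool :=
  let parts := PySem.Chars.splitOn (PySem.Chars.lower domain.toList) ['.']
  if 2 ≤ PySem.List.len parts ∧
      pvTLDS.contains ('.' :: (PySem.List.pyGetD parts (-2) [] ++ '.' :: PySem.List.pyGetD parts (-1) [])) then
    decide (4 ≤ PySem.List.len parts)
  else
    decide (3 ≤ PySem.List.len parts)

-- ===== PRECONDITION & SPEC =====
def Spec_is_subdomain (domain : String) (out : Bool) : Prop := out = is_subdomain_alt domain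
instance (domain : String) (out : Bool) : Decidable (Spec_is_subdomain domain out) := by unfold Spec_is_subdomain; infer_instance

-- ===== CLAIM (what is proved, stated in full; the proofs are below) =====
def Claim_equal_is_subdomain : Prop := ∀ (domain : String), Dom_is_subdomain domain → Spec_is_subdomain domain (is_subdomain domain)

-- ===== LEMMAS AND PROOFS =====

-- the 22 TLDs as their (second-level, top-level) label pairs
def pvPairs : List (List Char × List Char) :=
  [("co".toList,"uk".toList), ("co".toList,"jp".toList), ("co".toList,"kr".toList), ("co".toList,"nz".toList),
   ("co".toList,"za".toList), ("co".toList,"in".toList),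
   ("com".toList,"es".toList), ("com".toList,"br".toList), ("com".toList,"mx".toList), ("com".toList,"ar".toList),
   ("com".toList,"co".toList), ("com".toList,"au".toList),
   ("com".toList,"tr".toList), ("com".toList,"cn".toList), ("com".toList,"sg".toList), ("com".toList,"hk".toList),
   ("org".toList,"uk".toList), ("org".toList,"es".toList),
   ("net".toList,"au".toList), ("net".toList,"br".toList),
   ("ac".toList,"uk".toList), ("gov".toList,"uk".toList)]

def pvDotform (a b : List Char) : List Char := '.' :: (a ++ '.' :: b)

theorem pvTLDS_eq : pvTLDS = pvPairs.map (fun ab => pvDotform ab.1 ab.2) := by decide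

theorem pvPairs_dotfree : ∀ ab ∈ pvPairs, '.' ∉ ab.1 ∧ '.' ∉ ab.2 := by decide

theorem pv_go_eq (fuel : Nat) (l cur : List Char) (acc : List (List Char)) (h : l.length ≤ fuel) :
    PySem.Chars.splitOn.go ['.'] fuel l cur acc =
      acc.reverse ++ (List.splitOnP (· == '.') l).modifyHead (cur.reverse ++ ·) := by
  induction fuel generalizing l cur acc with
  | zero =>
    interval_cases hl : l.length
    · rw [List.length_eq_zero_iff] at hl; subst hl
      rw [PySem.Chars.splitOn.go]
      simp [List.splitOnP_nil]
  | succ f ih =>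
    cases l with
    | nil =>
      rw [PySem.Chars.splitOn.go]
      simp [List.splitOnP_nil]
      omega
    | cons c rest =>
      rw [PySem.Chars.splitOn.go]
      simp only [List.length_cons] at h
      by_cases hc : c = '.'
      · subst hc
        have hp : ['.'].isPrefixOf ('.' :: rest) = true := by simp [List.isPrefixOf]
        rw [if_pos hp]
        rw [ih _ _ _ (by simpa using Nat.le_of_succ_le_succ h)]
        obtain ⟨h0, t0, hsp⟩ := List.exists_cons_of_ne_nil (List.splitOnP_ne_nil (· == '.') rest)
        simp [List.splitOnP_cons, hsp]
      · have hp : ['.'].isPrefixOf (c :: rest) = false := by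
          simp [List.isPrefixOf]; exact fun hne => absurd hne.symm hc
        rw [if_neg (by simp [hp])]
        rw [ih _ _ _ (Nat.le_of_succ_le_succ h)]
        obtain ⟨h0, t0, hsp⟩ := List.exists_cons_of_ne_nil (List.splitOnP_ne_nil (· == '.') rest)
        simp [List.splitOnP_cons, hsp, hc]


theorem pv_splitOn_eq (l : List Char) :
    PySem.Chars.splitOn l ['.'] = List.splitOnP (· == '.') l := by
  rw [PySem.Chars.splitOn, pv_go_eq _ _ _ _ (Nat.le_succ _)]
  obtain ⟨h0, t0, hsp⟩ := List.exists_cons_of_ne_nil (List.splitOnP_ne_nil (· == '.') l)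
  simp [hsp]

theorem pv_dot_mem_iff (l : List Char) : '.' ∈ l ↔ 2 ≤ (List.splitOnP (· == '.') l).length := by
  induction l with
  | nil => simp [List.splitOnP_nil]
  | cons c rest ih =>
    obtain ⟨h0, t0, hsp⟩ := List.exists_cons_of_ne_nil (List.splitOnP_ne_nil (· == '.') rest)
    by_cases hc : c = '.'
    · subst hc; simp [List.splitOnP_cons, hsp]
    · rw [List.mem_cons]
      have hlen : (List.splitOnP (· == '.') (c :: rest)).length
          = (List.splitOnP (· == '.') rest).length := by
        simp [List.splitOnP_cons, hc, hsp]
      rw [hlen]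
      simpa [Ne.symm hc] using ih

theorem pv_pieces_dotfree (l : List Char) : ∀ x ∈ List.splitOnP (· == '.') l, '.' ∉ x := by
  induction l with
  | nil => simp [List.splitOnP_nil]
  | cons c rest ih =>
    obtain ⟨h0, t0, hsp⟩ := List.exists_cons_of_ne_nil (List.splitOnP_ne_nil (· == '.') rest)
    rw [hsp] at ih
    by_cases hc : c = '.'
    · subst hc; simp [List.splitOnP_cons, hsp]
      exact ⟨ih h0 (List.mem_cons_self ..), fun x hx => ih x (List.mem_cons_of_mem _ hx)⟩
    · simp [List.splitOnP_cons, hc, hsp]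
      refine ⟨⟨Ne.symm hc, ih h0 (List.mem_cons_self ..)⟩,
        fun x hx => ih x (List.mem_cons_of_mem _ hx)⟩

theorem pv_split_append (pre a b : List Char) (ha : '.' ∉ a) (hb : '.' ∉ b) :
    List.splitOnP (· == '.') (pre ++ pvDotform a b) = List.splitOnP (· == '.') pre ++ [a, b] := by
  rw [pvDotform, List.splitOnP_append_cons _ _ _ _ (by simp)]
  rw [List.splitOnP_first _ a (fun x hx => by simp; exact fun h => ha (h ▸ hx)) '.' (by simp) b]
  rw [List.splitOnP_eq_single _ b (fun x hx => by simp; exact fun h => hb (h ▸ hx))]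

theorem pv_intercalate_append (a b : List Char) (init : List (List Char)) (h : init ≠ []) :
    ['.'].intercalate (init ++ [a, b]) = ['.'].intercalate init ++ pvDotform a b := by
  induction init with
  | nil => simp at h
  | cons x t ih =>
    cases t with
    | nil => simp [List.intercalate, List.intersperse, pvDotform]
    | cons y t2 =>
      simp only [List.cons_append, List.intercalate, List.intersperse_cons₂, List.flatten_cons] at *
      simp [ih]

theorem pv_suffix_of_split (l a b : List Char) (init : List (List Char)) (h : init ≠ [])
    (hsp : List.splitOnP (· == '.') l = init ++ [a, b]) : pvDotform a b <:+ l := by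
  have hl := List.intercalate_splitOn (xs := l) '.'
  rw [show List.splitOn '.' l = List.splitOnP (· == '.') l from rfl, hsp,
    pv_intercalate_append a b init h] at hl
  exact ⟨_, hl⟩

theorem pv_loop_none (dl : List Char) (ts : List (List Char))
    (h : ∀ t ∈ ts, PySem.Chars.endswith dl t = false) : pvLoopA dl ts = none := by
  induction ts with
  | nil => rfl
  | cons t rest ih =>
    rw [pvLoopA, if_neg (by simp [h t (List.mem_cons_self ..)])]
    exact ih (fun t' ht' => h t' (List.mem_cons_of_mem _ ht'))

theorem pv_loop_some (dl t : List Char) (ts : List (List Char)) (ht : t ∈ ts)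
    (hm : PySem.Chars.endswith dl t = true)
    (hu : ∀ t' ∈ ts, PySem.Chars.endswith dl t' = true → t' = t) :
    pvLoopA dl ts =
      some (PySem.Chars.isIn ['.'] (PySem.Chars.slice dl none (some (-(PySem.List.len t))))) := by
  induction ts with
  | nil => simp at ht
  | cons t' rest ih =>
    by_cases he : PySem.Chars.endswith dl t' = true
    · have : t' = t := hu t' (List.mem_cons_self ..) he
      subst this
      rw [pvLoopA, if_pos he]
    · rw [pvLoopA, if_neg (by simp [he])]
      rcases List.mem_cons.mp ht with h1 | h1
      · exact absurd (h1 ▸ hm) he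
      · exact ih h1 (fun t'' ht'' => hu t'' (List.mem_cons_of_mem _ ht''))

theorem pv_unique_split (x y u v : List Char) (hx : '.' ∉ x) (hu : '.' ∉ u)
    (h : x ++ '.' :: y = u ++ '.' :: v) : x = u ∧ y = v := by
  induction x generalizing u with
  | nil =>
    cases u with
    | nil => simpa using h
    | cons a u' => simp at h; exact absurd (h.1 ▸ List.mem_cons_self ..) hu
  | cons c x' ih =>
    cases u with
    | nil => simp at h; exact absurd (h.1 ▸ List.mem_cons_self ..) hx
    | cons a u' =>
      simp at h
      obtain ⟨h1, h2⟩ := h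
      have := ih u' (fun hm => hx (List.mem_cons_of_mem _ hm)) (fun hm => hu (List.mem_cons_of_mem _ hm)) h2
      exact ⟨by rw [h1, this.1], this.2⟩

theorem pv_pyGetD_pair1 (xs : List (List Char)) (a b : List Char) :
    PySem.List.pyGetD (xs ++ [a, b]) (-2) [] = a := by
  rw [PySem.List.pyGetD_neg_ofNat _ 2 _ (by omega) (by simp)]
  simp

theorem pv_pyGetD_pair2 (xs : List (List Char)) (a b : List Char) :
    PySem.List.pyGetD (xs ++ [a, b]) (-1) [] = b := by
  rw [show xs ++ [a, b] = (xs ++ [a]) ++ [b] by simp]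
  exact PySem.List.pyGetD_neg_one_append_singleton ..

theorem pv_slice_pre (dl t pre : List Char) (h : dl = pre ++ t) (ht : t ≠ []) :
    PySem.Chars.slice dl none (some (-(PySem.List.len t))) = pre := by
  have h1 : PySem.List.slice dl none (some (-((t.length : Nat) : Int))) = dl.take (dl.length - t.length) :=
    PySem.List.slice_to_neg_natCast _ _ (by cases t <;> simp_all)
  simp only [PySem.Chars.slice_eq_listSlice, PySem.List.len_eq]
  rw [h1, h]
  simp [List.take_left']

theorem pv_isIn_dot (pre : List Char) : PySem.Chars.isIn ['.'] pre = decide ('.' ∈ pre) := by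
  by_cases h : '.' ∈ pre
  · simp [h]
    rw [PySem.Chars.isIn_iff_infix]
    obtain ⟨s, t, rfl⟩ := List.mem_iff_append.mp h
    exact ⟨s, t, by simp⟩
  · simp [h]
    rw [PySem.Chars.isIn_eq_false_iff]
    intro hin
    exact h (hin.mem (List.mem_cons_self ..))

theorem pv_two_split {α : Type} (P : List α) (h : 2 ≤ P.length) :
    ∃ xs a b, P = xs ++ [a, b] := by
  rcases hr : P.reverse with _ | ⟨b, r1⟩
  · simp [List.reverse_eq_nil_iff.mp hr] at h
  · rcases r1 with _ | ⟨a, r2⟩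
    · have := congrArg List.length hr; simp at this; omega
    · exact ⟨r2.reverse, a, b, by
        have := congrArg List.reverse hr; simpa using this⟩

theorem pv_main (l : List Char) :
    (match pvLoopA l pvTLDS with
      | some r => r
      | none => decide (3 ≤ PySem.List.len (PySem.Chars.splitOn l ['.']))) =
    (let parts := PySem.Chars.splitOn (l) ['.']
     if 2 ≤ PySem.List.len parts ∧
         pvTLDS.contains ('.' :: (PySem.List.pyGetD parts (-2) [] ++ '.' :: PySem.List.pyGetD parts (-1) [])) then
       decide (4 ≤ PySem.List.len parts)
     else
       decide (3 ≤ PySem.List.len parts)) := by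
  simp only [pv_splitOn_eq, PySem.List.len_eq]
  set P := List.splitOnP (· == '.') l with hP
  by_cases hm : ∃ ab ∈ pvPairs, PySem.Chars.endswith l (pvDotform ab.1 ab.2) = true
  · obtain ⟨ab, hab, hend⟩ := hm
    obtain ⟨pre, hl⟩ := (PySem.Chars.endswith_iff _ _).mp hend
    have hdf := pvPairs_dotfree ab hab
    have hsp : P = List.splitOnP (· == '.') pre ++ [ab.1, ab.2] := by
      rw [hP, ← hl, pv_split_append _ _ _ hdf.1 hdf.2]
    have hinitne : List.splitOnP (· == '.') pre ≠ [] := List.splitOnP_ne_nil _ pre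
    have huniq : ∀ t' ∈ pvTLDS, PySem.Chars.endswith l t' = true → t' = pvDotform ab.1 ab.2 := by
      intro t' ht' he'
      rw [pvTLDS_eq] at ht'
      obtain ⟨ab', hab', rfl⟩ := List.mem_map.mp ht'
      obtain ⟨pre', hl'⟩ := (PySem.Chars.endswith_iff _ _).mp he'
      have hdf' := pvPairs_dotfree ab' hab'
      have hsp' : P = List.splitOnP (· == '.') pre' ++ [ab'.1, ab'.2] := by
        rw [hP, ← hl', pv_split_append _ _ _ hdf'.1 hdf'.2]
      have h2 := (List.append_inj' (hsp'.symm.trans hsp) (by simp)).2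
      simp only [List.cons.injEq, and_true] at h2
      rw [pvDotform, pvDotform, h2.1, h2.2]
    rw [pv_loop_some l (pvDotform ab.1 ab.2) pvTLDS
      (by rw [pvTLDS_eq]; exact List.mem_map.mpr ⟨ab, hab, rfl⟩) hend huniq]
    rw [pv_slice_pre l (pvDotform ab.1 ab.2) pre hl.symm (by simp [pvDotform]), pv_isIn_dot]
    have hlen : P.length = (List.splitOnP (· == '.') pre).length + 2 := by rw [hsp]; simp
    have hinitlen : 1 ≤ (List.splitOnP (· == '.') pre).length :=
      List.length_pos_iff.mpr hinitne
    have hkey : ('.' :: (PySem.List.pyGetD P (-2) [] ++ '.' :: PySem.List.pyGetD P (-1) []))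
        = pvDotform ab.1 ab.2 := by
      rw [hsp, pv_pyGetD_pair1, pv_pyGetD_pair2, pvDotform]
    rw [if_pos ⟨by omega,
      by rw [hkey]; simp only [List.contains_iff_mem]
         rw [pvTLDS_eq]; exact List.mem_map.mpr ⟨ab, hab, rfl⟩⟩]
    show decide ('.' ∈ pre) = decide (4 ≤ (P.length : Int))
    apply decide_eq_decide.mpr
    rw [pv_dot_mem_iff pre]
    constructor
    · intro h; omega
    · intro h; omega
  · rw [pv_loop_none l pvTLDS (by
      intro t ht
      rw [pvTLDS_eq] at ht
      obtain ⟨ab, hab, rfl⟩ := List.mem_map.mp ht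
      cases he : PySem.Chars.endswith l (pvDotform ab.1 ab.2)
      · rfl
      · exact absurd ⟨ab, hab, he⟩ hm)]
    by_cases hcond : 2 ≤ (P.length : Int) ∧
        pvTLDS.contains ('.' :: (PySem.List.pyGetD P (-2) [] ++ '.' :: PySem.List.pyGetD P (-1) [])) = true
    · rw [if_pos hcond]
      obtain ⟨h2, hcontains⟩ := hcond
      have hsmall : P.length ≤ 2 := by
        by_contra hbig
        obtain ⟨xs, a, b, hxs⟩ := pv_two_split P (by omega)
        have hkey : ('.' :: (PySem.List.pyGetD P (-2) [] ++ '.' :: PySem.List.pyGetD P (-1) []))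
            = pvDotform a b := by
          rw [hxs, pv_pyGetD_pair1, pv_pyGetD_pair2, pvDotform]
        rw [hkey] at hcontains
        simp only [List.contains_iff_mem, pvTLDS_eq] at hcontains
        obtain ⟨ab', hab', heq⟩ := List.mem_map.mp hcontains
        have hdf' := pvPairs_dotfree ab' hab'
        have ha : '.' ∉ a := pv_pieces_dotfree l a (by rw [← hP] at *; rw [hxs]; simp)
        simp only [pvDotform, List.cons.injEq, true_and] at heq
        obtain ⟨h1, h2'⟩ := pv_unique_split ab'.1 ab'.2 a b hdf'.1 ha heq
        have hxsne : xs ≠ [] := by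
          intro hnil; rw [hnil] at hxs
          have := congrArg List.length hxs; simp at this; omega
        have hsuf : pvDotform ab'.1 ab'.2 <:+ l := by
          apply pv_suffix_of_split l ab'.1 ab'.2 xs hxsne
          rw [← hP, hxs, h1, h2']
        exact hm ⟨ab', hab', (PySem.Chars.endswith_iff _ _).mpr hsuf⟩
      apply decide_eq_decide.mpr
      constructor
      · intro h; push_cast at h; omega
      · intro h; push_cast at h; omega
    · rw [if_neg hcond]
-- ===== VERDICT (by name: the statement is the Claim_ definition above) =====
theorem is_subdomain_spec : Claim_equal_is_subdomain := by
  intro domain _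
  unfold Spec_is_subdomain is_subdomain is_subdomain_alt
  exact pv_main (PySem.Chars.lower domain.toList)
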